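-- pv_equiv track=rewrite | github.com/codyrlee18/CommentAnalysis | WorkingSA.py | codes_to_media_ids
-- ===== SOURCE A (Python) =====
-- def codes_to_media_ids(short_codes):
--     alphabet = 'ABCDEFGHIJKLMNOPQRSTUVWXYZabcdefghijklmnopqrstuvwxyz0123456789-_'
--     code_to_media_id = {}
--     for short_code in short_codes:
--         media_id = 0
--         for letter in short_code:
--             media_id = (media_id * 64) + alphabet.index(letter)
--         code_to_media_id[short_code] = media_id
--     return code_to_media_id
-- ===== SOURCE B (Python) =====
-- def codes_to_media_ids(short_codes):
--     alphabet = 'ABCDEFGHIJKLMNOPQRSTUVWXYZabcdefghijklmnopqrstuvwxyz0123456789-_'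
--
--     def decode(code):
--         if code == '':
--             return 0
--         return alphabet.index(code[0]) * 64 ** (len(code) - 1) + decode(code[1:])
--
--     unique_codes = list(dict.fromkeys(short_codes))
--     return {sc: decode(sc) for sc in unique_codes}
-- ===== Notes on version B (the rewrite author's own statement) =====
-- stated objective: alternative
-- what changed: Replaces A's dict-insert loop with Horner accumulator by a two-stage pipeline: dedup the codes first (dict.fromkeys), then map each unique code to its value computed by a recursive positional-weight decode (index * 64^rest + decode(rest)).
import Mathlib
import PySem

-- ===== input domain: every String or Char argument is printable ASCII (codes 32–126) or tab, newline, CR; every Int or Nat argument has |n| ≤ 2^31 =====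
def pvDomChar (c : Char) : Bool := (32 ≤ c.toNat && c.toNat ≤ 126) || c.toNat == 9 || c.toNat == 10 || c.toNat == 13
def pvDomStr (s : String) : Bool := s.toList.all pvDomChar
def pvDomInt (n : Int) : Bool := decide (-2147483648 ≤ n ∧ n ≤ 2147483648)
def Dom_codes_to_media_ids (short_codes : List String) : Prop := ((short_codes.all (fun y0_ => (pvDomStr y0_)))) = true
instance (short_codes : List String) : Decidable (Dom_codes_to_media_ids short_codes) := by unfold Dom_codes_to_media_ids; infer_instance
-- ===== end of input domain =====

-- B replaces A's dict-insert loop with Horner accumulator by: dedup the codes (dict.fromkeys), then map each unique code to a recursively computed positional-weight value — an alternative decomposition, same cost.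


-- shared constant (the alphabet literal of both Pythons) and alphabet.index
def pvAlphabet : List Char := "ABCDEFGHIJKLMNOPQRSTUVWXYZabcdefghijklmnopqrstuvwxyz0123456789-_".toList
def pvIdx (c : Char) : Int := (pvAlphabet.idxOf c : Int)   -- total stand-in for alphabet.index; exact on Pre_ (c ∈ alphabet)

-- ===== PORT A =====
def codes_to_media_ids (short_codes : List String) : List (String × Int) :=
  (short_codes.foldl
    (fun d sc => d.insert sc (sc.toList.foldl (fun m c => m * 64 + pvIdx c) 0))
    (PySem.Dict.empty : PySem.Dict String Int)).items

-- ===== PORT B =====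
-- decode(code): recursive positional-weight value of a code (Source B's inner def decode)
def pvDecode : List Char → Int
  | [] => 0
  | c :: t => pvIdx c * 64 ^ t.length + pvDecode t

def codes_to_media_ids_alt (short_codes : List String) : List (String × Int) :=
  (PySem.List.dedup short_codes).map (fun sc => (sc, pvDecode sc.toList))

-- ===== PRECONDITION & SPEC =====
-- Pre_ excludes exactly the inputs on which A raises ValueError: a code containing a character outside the 64-letter alphabet.
def Pre_codes_to_media_ids (short_codes : List String) : Prop :=
  (short_codes.all fun s => s.toList.all fun c => pvAlphabet.contains c) = true
instance (short_codes : List String) : Decidable (Pre_codes_to_media_ids short_codes) := by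
  unfold Pre_codes_to_media_ids; infer_instance
def pvWitness_codes_to_media_ids : List String := ["dQw4", "A", "", "9_-"]
def Spec_codes_to_media_ids (short_codes : List String) (out : List (String × Int)) : Prop := out = codes_to_media_ids_alt short_codes
instance (short_codes : List String) (out : List (String × Int)) : Decidable (Spec_codes_to_media_ids short_codes out) := by unfold Spec_codes_to_media_ids; infer_instance

-- ===== CLAIM (what is proved, stated in full; the proofs are below) =====
def Claim_equal_codes_to_media_ids : Prop := ∀ (short_codes : List String), Dom_codes_to_media_ids short_codes → Pre_codes_to_media_ids short_codes → Spec_codes_to_media_ids short_codes (codes_to_media_ids short_codes)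

-- ===== LEMMAS AND PROOFS =====

-- Horner with seed a = a * 64^len + Horner with seed 0
lemma horner_shift (l : List Char) : ∀ a : Int,
    l.foldl (fun m c => m * 64 + pvIdx c) a
      = a * 64 ^ l.length + l.foldl (fun m c => m * 64 + pvIdx c) 0 := by
  induction l with
  | nil => intro a; simp
  | cons c t ih =>
      intro a
      simp only [List.foldl_cons, List.length_cons]
      rw [ih (a * 64 + pvIdx c), ih (0 * 64 + pvIdx c)]
      ring

-- B's recursive decode computes A's Horner value
lemma decode_eq_horner (l : List Char) :
    pvDecode l = l.foldl (fun m c => m * 64 + pvIdx c) 0 := by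
  induction l with
  | nil => rfl
  | cons c t ih =>
      simp only [pvDecode, ih, List.foldl_cons]
      rw [horner_shift t (0 * 64 + pvIdx c)]
      ring

-- A's dict loop, keyed by a function of the key only, has items = dedup of the keys mapped through it
lemma items_foldl_insert_fn (f : String → Int) (codes : List String) :
    (codes.foldl (fun d sc => d.insert sc (f sc)) (PySem.Dict.empty : PySem.Dict String Int)).items
      = (PySem.List.dedup codes).map (fun sc => (sc, f sc)) := by
  induction codes using List.reverseRecOn with
  | nil => rfl
  | append_singleton l x ih =>
      rw [List.foldl_append, List.foldl_cons, List.foldl_nil]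
      have hkeys : (l.foldl (fun d sc => d.insert sc (f sc))
          (PySem.Dict.empty : PySem.Dict String Int)).contains x = decide (x ∈ l) := by
        rw [PySem.Dict.contains_eq_decide_mem_keys, PySem.Dict.keys_foldl_insert]
        simp [PySem.Set.update_nil_left, PySem.Set.mem_ofList, PySem.Dict.keys_empty]
      rw [PySem.Dict.items_insert, hkeys, ih]
      simp only [PySem.List.dedup_eq_ofList, PySem.Set.ofList_append_singleton, PySem.Set.add]
      by_cases hx : x ∈ l
      · simp only [hx, decide_true, if_true]
        have : PySem.Set.contains (PySem.Set.ofList l) x = true := by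
          simp [PySem.Set.contains, PySem.Set.mem_ofList, hx]
        rw [this]
        simp only [if_true, List.map_map]
        apply List.map_congr_left
        intro k _
        simp only [Function.comp]
        by_cases hk : k = x
        · subst hk; simp
        · simp [hk]
      · simp only [hx, decide_false]
        have : PySem.Set.contains (PySem.Set.ofList l) x = false := by
          simp [PySem.Set.contains, PySem.Set.mem_ofList, hx]
        rw [this]
        simp

-- ===== VERDICT (by name: the statement is the Claim_ definition above) =====
theorem codes_to_media_ids_spec : Claim_equal_codes_to_media_ids := by
  intro short_codes _ _
  unfold Spec_codes_to_media_ids codes_to_media_ids codes_to_media_ids_alt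
  rw [items_foldl_insert_fn (fun sc => sc.toList.foldl (fun m c => m * 64 + pvIdx c) 0)]
  simp [decode_eq_horner]
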